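-- pv_equiv track=rewrite | github.com/Vish-devop/AlgoSprint-Python | ThoughtWorks_CodingRounds/Story-Based Questions/Problem(1).py | Test_Action_Validator
-- ===== SOURCE A (Python) =====
-- def Test_Action_Validator(string):
--     # Case(1): Atleast 1 'V' must exist in the sequence.
--     if not string or "V" not in string:
--         return False
--
--     #Case(2): "C" should not present at last of the string.
--     if string[-1]=="C":
--         return False
--
--     #Case(3): "V" must not be followed by "I".
--     for i in range(len(string)-1):
--         if string[i]=="I" and string[i+1]!="V": return False
--
--     return True
-- ===== SOURCE B (Python) =====
-- import re
--
-- _BAD_I = re.compile("I[^V]")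
--
-- def Test_Action_Validator(string):
--     # Case(1): at least one 'V' must exist.
--     if not string or "V" not in string:
--         return False
--     # Case(2): 'C' must not be the last character.
--     if string[-1] == "C":
--         return False
--     # Case(3): no 'I' immediately followed by a non-'V' character
--     # (a trailing 'I' is allowed, as the regex needs a following char).
--     return _BAD_I.search(string) is None
-- ===== Notes on version B (the rewrite author's own statement) =====
-- stated objective: idiomatic
-- what changed: The index loop over adjacent positions is replaced by a single compiled regular-expression search for an I followed by anything other than V, i.e. a structural scan over adjacent character pairs instead of range/len indexing.
import Mathlib
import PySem

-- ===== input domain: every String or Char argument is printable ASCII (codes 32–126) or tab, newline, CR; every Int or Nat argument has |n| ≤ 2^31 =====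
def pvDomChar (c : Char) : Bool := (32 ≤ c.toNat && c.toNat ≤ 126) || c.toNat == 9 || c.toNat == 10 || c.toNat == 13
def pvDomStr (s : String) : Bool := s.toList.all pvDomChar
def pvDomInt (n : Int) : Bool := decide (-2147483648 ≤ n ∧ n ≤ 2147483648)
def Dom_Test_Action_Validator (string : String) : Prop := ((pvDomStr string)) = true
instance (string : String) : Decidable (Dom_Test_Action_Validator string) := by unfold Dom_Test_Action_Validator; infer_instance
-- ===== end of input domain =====

-- B replaces A's index loop over adjacent positions with a regex scan a compiled regular-expression search
-- (an I followed by a non-V), ported as a structural scan over adjacent character pairs (idiomatic, same cost).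

-- ===== PORT A =====
def Test_Action_Validator (string : String) : Bool :=
  -- if not string or "V" not in string: return False
  if string.toList.isEmpty || !(PySem.Str.isIn "V" string) then false
  -- if string[-1] == "C": return False
  else if PySem.Str.pyGet? string (-1) == some 'C' then false
  -- for i in range(len(string)-1): if string[i]=="I" and string[i+1]!="V": return False
  else if (PySem.List.pyRange 0 ((string.toList.length : Int) - 1) 1).any
            (fun i => PySem.List.pyGet? string.toList i == some 'I' &&
                      PySem.List.pyGet? string.toList (i + 1) != some 'V')
       then false
  else true

-- ===== PORT B =====
-- exact port of B's regex search on an ASCII string: does some 'I' have a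
-- following character that is not 'V'?  (a trailing 'I' has no following char)
def pvScanIV : List Char → Bool
  | c1 :: c2 :: rest => (c1 == 'I' && c2 != 'V') || pvScanIV (c2 :: rest)
  | _ => false

def Test_Action_Validator_alt (string : String) : Bool :=
  if string.toList.isEmpty || !(PySem.Str.isIn "V" string) then false
  else if PySem.Str.pyGet? string (-1) == some 'C' then false
  else !(pvScanIV string.toList)

-- ===== PRECONDITION & SPEC =====
def Spec_Test_Action_Validator (string : String) (out : Bool) : Prop := out = Test_Action_Validator_alt string
instance (string : String) (out : Bool) : Decidable (Spec_Test_Action_Validator string out) := by unfold Spec_Test_Action_Validator; infer_instance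

-- ===== CLAIM (what is proved, stated in full; the proofs are below) =====
def Claim_equal_Test_Action_Validator : Prop := ∀ (string : String), Dom_Test_Action_Validator string → Spec_Test_Action_Validator string (Test_Action_Validator string)

-- ===== LEMMAS AND PROOFS =====

-- the index loop and the pair scan agree on every list
theorem any_range_eq_pvScanIV (l : List Char) :
    (List.range (l.length - 1)).any
      (fun k => l[k]? == some 'I' && l[k + 1]? != some 'V') = pvScanIV l := by
  induction l with
  | nil => simp [pvScanIV]
  | cons c1 t ih =>
    cases t with
    | nil => simp [pvScanIV]
    | cons c2 rest =>
      have hlen : (c1 :: c2 :: rest).length - 1 = (c2 :: rest).length - 1 + 1 := by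
        simp
      rw [hlen, List.range_succ_eq_map]
      simp only [List.any_cons, List.any_map, pvScanIV]
      rw [← ih]
      simp only [Function.comp_def]
      congr 1

-- A's pyRange-any is the range-any over Nat indices
theorem pyRange_any_eq (l : List Char) :
    (PySem.List.pyRange 0 ((l.length : Int) - 1) 1).any
      (fun i => PySem.List.pyGet? l i == some 'I' &&
                PySem.List.pyGet? l (i + 1) != some 'V')
    = (List.range (l.length - 1)).any
        (fun k => l[k]? == some 'I' && l[k + 1]? != some 'V') := by
  rw [PySem.List.pyRange_one]
  simp only [sub_zero, List.any_map]
  have htn : ((l.length : Int) - 1).toNat = l.length - 1 := by omega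
  rw [htn]
  refine List.any_congr rfl ?_
  intro k
  simp only [Function.comp_def, zero_add]
  have h1 : ((k : Int) + 1) = ((k + 1 : Nat) : Int) := by push_cast; ring
  rw [h1, PySem.List.pyGet?_natCast, PySem.List.pyGet?_natCast]

-- ===== VERDICT (by name: the statement is the Claim_ definition above) =====
theorem Test_Action_Validator_spec : Claim_equal_Test_Action_Validator := by
  intro s _
  unfold Spec_Test_Action_Validator Test_Action_Validator Test_Action_Validator_alt
  rw [pyRange_any_eq s.toList, any_range_eq_pvScanIV s.toList]
  split_ifs with h1 h2 <;> simp_all
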